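-- pv_equiv track=rewrite | github.com/elaforge/qlib | dotfiles/.vim/py/swapwords.py | index_to_cursor
-- ===== SOURCE A (Python) =====
-- def index_to_cursor(text, i):
--     row = 0
--     start = 0
--     while True:
--         end = text.find('\n', start)
--         length = end - start + 1 # +1 for newline
--         if end == -1 or length > i:
--             break
--         i -= length
--         start = end + 1
--         row += 1
--     return (row, i)
-- ===== SOURCE B (Python) =====
-- def index_to_cursor(text, i):
--     b = i if i > 0 else 0
--     row = text.count('\n', 0, b)
--     p = text.rfind('\n', 0, b)
--     return (row, i - p - 1)
-- ===== Notes on version B (the rewrite author's own statement) =====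
-- stated objective: simpler
-- what changed: Replaces the per-line find loop with three direct string-scan primitives: count newlines before the clamped index for the row and subtract the offset of the last preceding newline for the column.
import Mathlib
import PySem

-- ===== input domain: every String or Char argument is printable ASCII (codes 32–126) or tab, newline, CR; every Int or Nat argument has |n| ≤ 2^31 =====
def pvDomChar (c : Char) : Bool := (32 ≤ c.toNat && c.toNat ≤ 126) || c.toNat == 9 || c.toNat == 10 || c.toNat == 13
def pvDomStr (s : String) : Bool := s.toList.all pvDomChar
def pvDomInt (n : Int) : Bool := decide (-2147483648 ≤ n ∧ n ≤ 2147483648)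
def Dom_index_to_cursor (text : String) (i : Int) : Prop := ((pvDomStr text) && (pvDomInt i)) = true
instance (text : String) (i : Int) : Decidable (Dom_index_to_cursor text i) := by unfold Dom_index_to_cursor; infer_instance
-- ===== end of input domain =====

-- B replaces A's per-line find loop by counting newlines before the clamped index
-- (row) and subtracting the last preceding newline's offset (col); objective: simpler.

-- ===== PORT A =====
-- findNl cs: exact port of text.find('\n', start) made relative to the suffix
-- cs = text[start:] (Python returns start + relative index, or -1 = none here).
def findNl : List Char → Option Nat
  | [] => none
  | c :: rest => if c = '\n' then some 0 else (findNl rest).map (· + 1)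

theorem findNl_lt_length : ∀ (cs : List Char) (k : Nat), findNl cs = some k → k < cs.length := by
  intro cs
  induction cs with
  | nil => intro k h; simp [findNl] at h
  | cons c rest ih =>
    intro k h
    simp only [findNl] at h
    split at h
    · simp only [Option.some.injEq] at h
      simp [← h]
    · simp only [Option.map_eq_some_iff] at h
      obtain ⟨j, hj, rfl⟩ := h
      have := ih j hj
      simp; omega

-- A's while-loop: state (remaining text after 'start', row, i); break conditions
-- and updates transcribed in order.
def loopA (cs : List Char) (row i : Int) : Int × Int :=
  match h : findNl cs with
  | none => (row, i)                                  -- end == -1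
  | some k =>
    if (k : Int) + 1 > i then (row, i)                -- length > i
    else loopA (cs.drop (k + 1)) (row + 1) (i - ((k : Int) + 1))
termination_by cs.length
decreasing_by
  have := findNl_lt_length cs k h
  simp only [List.length_drop]
  omega

def index_to_cursor (text : String) (i : Int) : Int × Int :=
  loopA text.toList 0 i

-- ===== PORT B =====
-- rfindNl cs: exact port of text.rfind('\n', 0, b) applied to the prefix cs =
-- text[:b] (index of last newline, or -1).
def rfindNl : List Char → Int
  | [] => -1
  | c :: rest =>
    let r := rfindNl rest
    if r ≥ 0 then r + 1 else if c = '\n' then 0 else -1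

def index_to_cursor_alt (text : String) (i : Int) : Int × Int :=
  let b := (max i 0).toNat                 -- b = i if i > 0 else 0 (as a bound)
  let pre := text.toList.take b            -- text[0:b], clamped like Python's bounds
  ((pre.count '\n' : Int), i - rfindNl pre - 1)

-- ===== PRECONDITION & SPEC =====
def Spec_index_to_cursor (text : String) (i : Int) (out : Int × Int) : Prop := out = index_to_cursor_alt text i
instance (text : String) (i : Int) (out : Int × Int) : Decidable (Spec_index_to_cursor text i out) := by unfold Spec_index_to_cursor; infer_instance

-- ===== CLAIM (what is proved, stated in full; the proofs are below) =====
def Claim_equal_index_to_cursor : Prop := ∀ (text : String) (i : Int), Dom_index_to_cursor text i → Spec_index_to_cursor text i (index_to_cursor text i)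

-- ===== LEMMAS AND PROOFS =====

theorem rfindNl_ge : ∀ (cs : List Char), rfindNl cs ≥ -1 := by
  intro cs
  induction cs with
  | nil => simp [rfindNl]
  | cons c rest ih =>
    simp only [rfindNl]
    split_ifs <;> omega

theorem rfindNl_no_nl : ∀ (cs : List Char), '\n' ∉ cs → rfindNl cs = -1 := by
  intro cs
  induction cs with
  | nil => intro _; rfl
  | cons c rest ih =>
    intro h
    simp only [List.mem_cons, not_or] at h
    have hr := ih h.2
    simp only [rfindNl, hr]
    have hc : ¬ c = '\n' := fun e => h.1 e.symm
    simp [hc]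

theorem rfindNl_cons_nl (t : List Char) : rfindNl ('\n' :: t) = rfindNl t + 1 := by
  have := rfindNl_ge t
  simp only [rfindNl]
  split_ifs with h
  · rfl
  · omega

theorem rfindNl_append_nl : ∀ (xs ys : List Char), rfindNl (xs ++ '\n' :: ys) = (xs.length : Int) + 1 + rfindNl ys := by
  intro xs ys
  induction xs with
  | nil => simp [rfindNl_cons_nl]; omega
  | cons c xs ih =>
    have hge := rfindNl_ge ys
    simp only [List.cons_append, rfindNl, ih]
    have : (xs.length : Int) + 1 + rfindNl ys ≥ 0 := by omega
    simp only [if_pos this, List.length_cons]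
    push_cast
    omega

theorem findNl_none : ∀ (cs : List Char), findNl cs = none → '\n' ∉ cs := by
  intro cs
  induction cs with
  | nil => simp
  | cons c rest ih =>
    intro h
    simp only [findNl] at h
    split at h
    · simp at h
    · rename_i hc
      simp only [Option.map_eq_none_iff] at h
      have := ih h
      simp only [List.mem_cons, not_or]
      exact ⟨fun e => hc e.symm, this⟩

theorem findNl_some : ∀ (cs : List Char) (k : Nat), findNl cs = some k →
    ∃ pre tail, cs = pre ++ '\n' :: tail ∧ pre.length = k ∧ '\n' ∉ pre := by
  intro cs
  induction cs with
  | nil => intro k h; simp [findNl] at h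
  | cons c rest ih =>
    intro k h
    simp only [findNl] at h
    split at h
    · rename_i hc
      simp only [Option.some.injEq] at h
      exact ⟨[], rest, by simp [hc, ← h]⟩
    · rename_i hc
      simp only [Option.map_eq_some_iff] at h
      obtain ⟨j, hj, rfl⟩ := h
      obtain ⟨pre, tail, hcs, hlen, hnl⟩ := ih j hj
      refine ⟨c :: pre, tail, by simp [hcs], by simp [hlen], ?_⟩
      simp only [List.mem_cons, not_or]
      exact ⟨fun e => hc e.symm, hnl⟩

theorem count_no_nl (cs : List Char) (h : '\n' ∉ cs) : cs.count '\n' = 0 :=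
  List.count_eq_zero.mpr h

-- Main invariant: A's loop from state (cs, row, i) equals B's closed form shifted by row.
theorem loopA_eq : ∀ (cs : List Char) (row i : Int),
    loopA cs row i =
      (row + (((cs.take (max i 0).toNat).count '\n' : Int)),
       i - rfindNl (cs.take (max i 0).toNat) - 1) := by
  intro cs row i
  fun_induction loopA cs row i with
  | case1 cs row i h =>
    -- findNl cs = none : no newline anywhere
    have hnl := findNl_none cs h
    have hnl' : '\n' ∉ cs.take (max i 0).toNat := fun hm => hnl (List.mem_of_mem_take hm)
    rw [count_no_nl _ hnl', rfindNl_no_nl _ hnl']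
    simp
  | case2 cs row i k h hbrk =>
    -- first newline at k, and k + 1 > i : break with (row, i)
    obtain ⟨pre, tail, rfl, hlen, hnlpre⟩ := findNl_some cs k h
    have hb : (max i 0).toNat ≤ k := by
      rcases le_total i 0 with h0 | h0
      · rw [max_eq_right h0]; omega
      · rw [max_eq_left h0]; omega
    have hnl' : '\n' ∉ (pre ++ '\n' :: tail).take (max i 0).toNat := by
      intro hm
      have := List.mem_of_mem_take hm
      have htk : (pre ++ '\n' :: tail).take (max i 0).toNat = pre.take (max i 0).toNat := by
        rw [List.take_append_of_le_length (by omega)]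
      rw [htk] at hm
      exact hnlpre (List.mem_of_mem_take hm)
    rw [count_no_nl _ hnl', rfindNl_no_nl _ hnl']
    simp
  | case3 cs row i k h hbrk ih =>
    -- first newline at k, i ≥ k + 1 : consume the line and recurse
    obtain ⟨pre, tail, rfl, hlen, hnlpre⟩ := findNl_some cs k h
    have hik : i ≥ (k : Int) + 1 := by omega
    have hdrop : (pre ++ '\n' :: tail).drop (k + 1) = tail := by
      rw [show k + 1 = pre.length + 1 from by omega]
      rw [List.drop_append]
      simp
    have hb : (max i 0).toNat = i.toNat := by
      rw [max_eq_left (by omega)]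
    have hb' : (max (i - ((k : Int) + 1)) 0).toNat = i.toNat - (k + 1) := by
      rw [max_eq_left (by omega)]; omega
    have htake : (pre ++ '\n' :: tail).take (max i 0).toNat
        = pre ++ '\n' :: tail.take (i.toNat - (k + 1)) := by
      rw [hb, List.take_append, List.take_of_length_le (by omega)]
      have : i.toNat - pre.length = (i.toNat - (k + 1)) + 1 := by omega
      rw [this, List.take_succ_cons]
    rw [hdrop, hb'] at ih
    rw [hdrop, ih, htake, rfindNl_append_nl]
    have hcnt : (pre ++ '\n' :: tail.take (i.toNat - (k + 1))).count '\n'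
        = (tail.take (i.toNat - (k + 1))).count '\n' + 1 := by
      rw [List.count_append, count_no_nl _ hnlpre, List.count_cons_self]
      omega
    rw [hcnt]
    refine Prod.ext ?_ ?_ <;> simp <;> omega

-- ===== VERDICT (by name: the statement is the Claim_ definition above) =====
theorem index_to_cursor_spec : Claim_equal_index_to_cursor := by
  intro text i _
  unfold Spec_index_to_cursor index_to_cursor index_to_cursor_alt
  rw [loopA_eq]
  simp
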